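-- pv_equiv track=rewrite | github.com/farahrahin/resume_job_matching_system_-NLP-Based- | Job_matcher_skills.py | get_matched_skills
-- ===== SOURCE A (Python) =====
-- def get_matched_skills(resume_skills, job_desc):
--     if not job_desc:
--         return []
--     text = str(job_desc).lower()
--     matched = []
--     for s in resume_skills:
--         # Basic phrase matching + some common variations
--         if s in text:
--             matched.append(s)
--         elif s == "communication skills" and any(x in text for x in [
--             "communication skill", "communication skills", "strong communication",
--             "excellent communication", "good communication", "communicate effectively"
--         ]):
--             matched.append("communication skills")
--         elif s == "teamwork" and "team" in text:
--             matched.append("teamwork")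
--         elif s == "problem solving" and any(x in text for x in ["problem solving", "problem-solving"]):
--             matched.append("problem solving")
--     return sorted(list(set(matched)))
-- ===== SOURCE B (Python) =====
-- _TRIGGERS = {
--     "communication skills": [
--         "communication skill", "communication skills", "strong communication",
--         "excellent communication", "good communication", "communicate effectively"
--     ],
--     "teamwork": ["team"],
--     "problem solving": ["problem solving", "problem-solving"],
-- }
--
--
-- def _insort_unique(out, s):
--     # insert s into the sorted, duplicate-free list out, keeping it so
--     i = 0
--     while i < len(out) and out[i] < s:
--         i += 1
--     if i == len(out) or out[i] != s:
--         out.insert(i, s)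
--
--
-- def get_matched_skills(resume_skills, job_desc):
--     if not job_desc:
--         return []
--     text = str(job_desc).lower()
--     # stage 1: one pass over the fixed trigger table — which phrases occur at all
--     hits = {p for ps in _TRIGGERS.values() for p in ps if p in text}
--     # stage 2: build the sorted, deduplicated result incrementally
--     out = []
--     for s in resume_skills:
--         if s in text or any(p in hits for p in _TRIGGERS.get(s, [])):
--             _insort_unique(out, s)
--     return out
-- ===== Notes on version B (the rewrite author's own statement) =====
-- stated objective: alternative
-- what changed: B precomputes in one pass over a fixed trigger table the set of variant phrases present in the text, then builds the result directly as a sorted duplicate-free list via ordered insertion, replacing A's if/elif ladder plus append-then-sorted(set(...)) pipeline.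
import Mathlib
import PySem

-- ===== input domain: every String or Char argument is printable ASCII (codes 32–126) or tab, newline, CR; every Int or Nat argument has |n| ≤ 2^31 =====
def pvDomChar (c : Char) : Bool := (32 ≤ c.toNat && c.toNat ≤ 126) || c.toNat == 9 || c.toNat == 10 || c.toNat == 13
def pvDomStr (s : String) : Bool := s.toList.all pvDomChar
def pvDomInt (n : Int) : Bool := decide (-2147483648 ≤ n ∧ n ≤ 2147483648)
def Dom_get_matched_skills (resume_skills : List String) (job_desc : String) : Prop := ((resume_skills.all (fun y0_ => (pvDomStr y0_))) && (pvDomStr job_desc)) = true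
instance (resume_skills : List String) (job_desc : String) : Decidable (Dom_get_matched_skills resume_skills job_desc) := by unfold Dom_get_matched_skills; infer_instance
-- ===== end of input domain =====

-- B precomputes the set of trigger phrases present in the text and builds the result as a
-- sorted duplicate-free list by ordered insertion, instead of A's if/elif ladder + sorted(set(...)).

-- ===== PORT A =====
def get_matched_skills (resume_skills : List String) (job_desc : String) : List String :=
  if job_desc = "" then []
  else
    let text := PySem.Str.lower job_desc
    let matched := resume_skills.foldl (fun m s =>
      if PySem.Str.isIn s text then m ++ [s]
      else if s = "communication skills" &&
          (["communication skill", "communication skills", "strong communication",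
            "excellent communication", "good communication",
            "communicate effectively"].any (fun x => PySem.Str.isIn x text)) then
        m ++ ["communication skills"]
      else if s = "teamwork" && PySem.Str.isIn "team" text then
        m ++ ["teamwork"]
      else if s = "problem solving" &&
          (["problem solving", "problem-solving"].any (fun x => PySem.Str.isIn x text)) then
        m ++ ["problem solving"]
      else m) []
    PySem.List.sorted (PySem.Set.ofList matched) (fun x => x) false

-- ===== PORT B =====
def pvTriggers : PySem.Dict String (List String) :=
  PySem.Dict.ofList
    [("communication skills",
      ["communication skill", "communication skills", "strong communication",
       "excellent communication", "good communication", "communicate effectively"]),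
     ("teamwork", ["team"]),
     ("problem solving", ["problem solving", "problem-solving"])]

-- _insort_unique: insert s into the sorted duplicate-free list out, keeping it so
def pvInsortUnique (out : List String) (s : String) : List String :=
  match out with
  | [] => [s]
  | x :: xs => if x < s then x :: pvInsortUnique xs s
               else if x ≠ s then s :: x :: xs else x :: xs

def get_matched_skills_alt (resume_skills : List String) (job_desc : String) : List String :=
  if job_desc = "" then []
  else
    let text := PySem.Str.lower job_desc
    -- stage 1: which trigger phrases occur at all
    let hits : PySem.Set String :=
      PySem.Set.ofList ((PySem.Dict.values pvTriggers).flatMap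
        (fun ps => ps.filter (fun p => PySem.Str.isIn p text)))
    -- stage 2: sorted deduplicated result built incrementally
    resume_skills.foldl (fun out s =>
      if PySem.Str.isIn s text ||
          (pvTriggers.getD s []).any (fun p => PySem.Set.contains hits p) then
        pvInsortUnique out s
      else out) []

-- ===== PRECONDITION & SPEC =====
def Spec_get_matched_skills (resume_skills : List String) (job_desc : String) (out : List String) : Prop := out = get_matched_skills_alt resume_skills job_desc
instance (resume_skills : List String) (job_desc : String) (out : List String) : Decidable (Spec_get_matched_skills resume_skills job_desc out) := by unfold Spec_get_matched_skills; infer_instance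

-- ===== CLAIM (what is proved, stated in full; the proofs are below) =====
def Claim_equal_get_matched_skills : Prop := ∀ (resume_skills : List String) (job_desc : String), Dom_get_matched_skills resume_skills job_desc → Spec_get_matched_skills resume_skills job_desc (get_matched_skills resume_skills job_desc)

-- ===== LEMMAS AND PROOFS =====

-- pvCondB: the single combined guard B tests for each skill
def pvHitsOf (text : String) : PySem.Set String :=
  PySem.Set.ofList ((PySem.Dict.values pvTriggers).flatMap
    (fun ps => ps.filter (fun p => PySem.Str.isIn p text)))

def pvCondB (text s : String) : Bool :=
  PySem.Str.isIn s text ||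
    (pvTriggers.getD s []).any (fun p => PySem.Set.contains (pvHitsOf text) p)

lemma values_pvTriggers : PySem.Dict.values pvTriggers =
    [["communication skill", "communication skills", "strong communication",
      "excellent communication", "good communication", "communicate effectively"],
     ["team"], ["problem solving", "problem-solving"]] := rfl

lemma getD_comm : pvTriggers.getD "communication skills" [] =
    ["communication skill", "communication skills", "strong communication",
     "excellent communication", "good communication", "communicate effectively"] := rfl

lemma getD_team : pvTriggers.getD "teamwork" [] = ["team"] := rfl

lemma getD_prob : pvTriggers.getD "problem solving" [] = ["problem solving", "problem-solving"] := rfl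

lemma items_pvTriggers : pvTriggers.items =
    [("communication skills",
      ["communication skill", "communication skills", "strong communication",
       "excellent communication", "good communication", "communicate effectively"]),
     ("teamwork", ["team"]),
     ("problem solving", ["problem solving", "problem-solving"])] := rfl

lemma getD_other (s : String) (h1 : s ≠ "communication skills") (h2 : s ≠ "teamwork")
    (h3 : s ≠ "problem solving") : pvTriggers.getD s [] = [] := by
  have h1' : ("communication skills" == s) = false := by simp [Ne.symm h1]
  have h2' : ("teamwork" == s) = false := by simp [Ne.symm h2]
  have h3' : ("problem solving" == s) = false := by simp [Ne.symm h3]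
  simp [PySem.Dict.getD, PySem.Dict.get?, items_pvTriggers, List.find?, h1', h2', h3']

-- a trigger phrase is in the precomputed hit set iff it occurs in the text
lemma mem_pvHits (text p : String)
    (h : p ∈ (["communication skill", "communication skills", "strong communication",
      "excellent communication", "good communication", "communicate effectively",
      "team", "problem solving", "problem-solving"] : List String)) :
    (p ∈ pvHitsOf text) ↔ PySem.Str.isIn p text = true := by
  fin_cases h <;>
    simp [pvHitsOf, PySem.Set.mem_ofList, values_pvTriggers, List.mem_filter]

-- A's four-branch ladder step appends s exactly when B's combined guard holds
lemma step_eq (text : String) (m : List String) (s : String) :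
    (if PySem.Str.isIn s text then m ++ [s]
      else if s = "communication skills" &&
          (["communication skill", "communication skills", "strong communication",
            "excellent communication", "good communication",
            "communicate effectively"].any (fun x => PySem.Str.isIn x text)) then
        m ++ ["communication skills"]
      else if s = "teamwork" && PySem.Str.isIn "team" text then
        m ++ ["teamwork"]
      else if s = "problem solving" &&
          (["problem solving", "problem-solving"].any (fun x => PySem.Str.isIn x text)) then
        m ++ ["problem solving"]
      else m)
    = (if pvCondB text s then m ++ [s] else m) := by
  unfold pvCondB
  by_cases h1 : s = "communication skills"
  · subst h1
    rw [getD_comm]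
    by_cases c0 : PySem.Str.isIn "communication skills" text = true <;>
    by_cases c1 : PySem.Str.isIn "communication skill" text = true <;>
    by_cases c2 : PySem.Str.isIn "strong communication" text = true <;>
    by_cases c3 : PySem.Str.isIn "excellent communication" text = true <;>
    by_cases c4 : PySem.Str.isIn "good communication" text = true <;>
    by_cases c5 : PySem.Str.isIn "communicate effectively" text = true <;>
    simp_all [mem_pvHits text "communication skill" (by decide),
      mem_pvHits text "communication skills" (by decide),
      mem_pvHits text "strong communication" (by decide),
      mem_pvHits text "excellent communication" (by decide),
      mem_pvHits text "good communication" (by decide),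
      mem_pvHits text "communicate effectively" (by decide)]
  · by_cases h2 : s = "teamwork"
    · subst h2
      rw [getD_team]
      by_cases c0 : PySem.Str.isIn "teamwork" text = true <;>
      by_cases c1 : PySem.Str.isIn "team" text = true <;>
      simp_all [mem_pvHits text "team" (by decide)]
    · by_cases h3 : s = "problem solving"
      · subst h3
        rw [getD_prob]
        by_cases c0 : PySem.Str.isIn "problem solving" text = true <;>
        by_cases c1 : PySem.Str.isIn "problem-solving" text = true <;>
        simp_all [mem_pvHits text "problem solving" (by decide),
          mem_pvHits text "problem-solving" (by decide)]
      · rw [getD_other s h1 h2 h3]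
        simp [h1, h2, h3]

lemma matched_eq (text : String) (resume_skills : List String) :
    resume_skills.foldl (fun m s =>
      if PySem.Str.isIn s text then m ++ [s]
      else if s = "communication skills" &&
          (["communication skill", "communication skills", "strong communication",
            "excellent communication", "good communication",
            "communicate effectively"].any (fun x => PySem.Str.isIn x text)) then
        m ++ ["communication skills"]
      else if s = "teamwork" && PySem.Str.isIn "team" text then
        m ++ ["teamwork"]
      else if s = "problem solving" &&
          (["problem solving", "problem-solving"].any (fun x => PySem.Str.isIn x text)) then
        m ++ ["problem solving"]
      else m) []
    = resume_skills.filter (pvCondB text) := by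
  have hfun : (fun (m : List String) (s : String) =>
      if PySem.Str.isIn s text then m ++ [s]
      else if s = "communication skills" &&
          (["communication skill", "communication skills", "strong communication",
            "excellent communication", "good communication",
            "communicate effectively"].any (fun x => PySem.Str.isIn x text)) then
        m ++ ["communication skills"]
      else if s = "teamwork" && PySem.Str.isIn "team" text then
        m ++ ["teamwork"]
      else if s = "problem solving" &&
          (["problem solving", "problem-solving"].any (fun x => PySem.Str.isIn x text)) then
        m ++ ["problem solving"]
      else m)
    = (fun m s => if pvCondB text s then m ++ [s] else m) :=
    funext fun m => funext fun s => step_eq text m s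
  rw [hfun]
  have h := PySem.List.foldl_append_if (pvCondB text) (fun s => s) resume_skills []
  simpa using h

-- B's guarded fold is the plain insort fold over the filtered list
lemma alt_eq (rs : List String) (jd : String) (h : jd ≠ "") :
    get_matched_skills_alt rs jd
    = (rs.filter (pvCondB (PySem.Str.lower jd))).foldl pvInsortUnique [] := by
  unfold get_matched_skills_alt
  rw [if_neg h]
  show rs.foldl (fun out s =>
    if pvCondB (PySem.Str.lower jd) s then pvInsortUnique out s else out) [] = _
  exact (List.foldl_filter).symm

lemma mem_insort (out : List String) (s y : String) :
    y ∈ pvInsortUnique out s ↔ y ∈ out ∨ y = s := by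
  induction out with
  | nil => simp [pvInsortUnique]
  | cons x xs ih =>
    unfold pvInsortUnique
    split_ifs with h1 h2
    · simp [ih]; tauto
    · simp; tauto
    · simp at h2; subst h2; simp; tauto

lemma pairwise_insort (out : List String) (s : String) (h : out.Pairwise (· < ·)) :
    (pvInsortUnique out s).Pairwise (· < ·) := by
  induction out with
  | nil => simp [pvInsortUnique]
  | cons x xs ih =>
    rw [List.pairwise_cons] at h
    unfold pvInsortUnique
    split_ifs with h1 h2
    · rw [List.pairwise_cons]
      refine ⟨fun y hy => ?_, ih h.2⟩
      rcases (mem_insort xs s y).mp hy with hy | rfl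
      · exact h.1 y hy
      · exact h1
    · have hlt : s < x := lt_of_le_of_ne (le_of_not_gt h1) (Ne.symm h2)
      rw [List.pairwise_cons]
      exact ⟨fun y hy => by
        rcases List.mem_cons.mp hy with rfl | hy
        · exact hlt
        · exact lt_trans hlt (h.1 y hy), List.pairwise_cons.mpr h⟩
    · exact List.pairwise_cons.mpr h

lemma mem_foldl_insort (m acc : List String) (y : String) :
    y ∈ m.foldl pvInsortUnique acc ↔ y ∈ acc ∨ y ∈ m := by
  induction m generalizing acc with
  | nil => simp
  | cons x xs ih =>
    simp only [List.foldl_cons, ih, mem_insort, List.mem_cons]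
    tauto

lemma pairwise_foldl_insort (m acc : List String) (h : acc.Pairwise (· < ·)) :
    (m.foldl pvInsortUnique acc).Pairwise (· < ·) := by
  induction m generalizing acc with
  | nil => exact h
  | cons x xs ih => exact ih _ (pairwise_insort acc x h)

-- sorting the dedup of m equals building the sorted unique list by insertion
lemma sorted_eq_insort (m : List String) :
    PySem.List.sorted (PySem.Set.ofList m) (fun x => x) false = m.foldl pvInsortUnique [] := by
  have hpw : (m.foldl pvInsortUnique []).Pairwise (· < ·) :=
    pairwise_foldl_insort m [] (by simp)
  have hnd : (m.foldl pvInsortUnique []).Nodup :=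
    hpw.imp (fun h => ne_of_lt h)
  have hperm : (m.foldl pvInsortUnique []).Perm (PySem.Set.ofList m) := by
    rw [List.perm_ext_iff_of_nodup hnd (PySem.Set.nodup_ofList m)]
    intro a
    rw [mem_foldl_insort, PySem.Set.mem_ofList]
    simp
  exact PySem.List.sorted_eq_of_perm_of_pairwise_lt _ _ _ hperm hpw

-- ===== VERDICT (by name: the statement is the Claim_ definition above) =====
theorem get_matched_skills_spec : Claim_equal_get_matched_skills := by
  intro resume_skills job_desc _
  unfold Spec_get_matched_skills
  by_cases h : job_desc = ""
  · unfold get_matched_skills get_matched_skills_alt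
    simp [h]
  · rw [alt_eq resume_skills job_desc h]
    unfold get_matched_skills
    rw [if_neg h]
    show PySem.List.sorted (PySem.Set.ofList (resume_skills.foldl _ [])) (fun x => x) false = _
    rw [matched_eq, sorted_eq_insort]
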